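-- pv_equiv track=rewrite | github.com/astar-security/Lestat | RobbTheRobber.py | statLength
-- ===== SOURCE A (Python) =====
-- def statLength(passwords):
--     """produce data for length stats"""
--     lengths = {"all":[0]*16, "active":[0]*16}
--     for p in passwords["all"]:
--         l = len(p)
--         if l >= 15:
--             lengths["all"][15] += 1
--         else:
--             lengths["all"][l] += 1
--     for p in passwords["active"]:
--         l = len(p)
--         if l >= 15:
--             lengths["active"][15] += 1
--         else:
--             lengths["active"][l] += 1
--     return lengths
-- ===== SOURCE B (Python) =====
-- def statLength(passwords):
--     """produce data for length stats"""
--     def hist(ps):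
--         # one scan per bucket: slot i holds how many passwords clamp to length i
--         return [sum(1 for p in ps if min(len(p), 15) == i) for i in range(16)]
--     return {"all": hist(passwords["all"]), "active": hist(passwords["active"])}
-- ===== Notes on version B (the rewrite author's own statement) =====
-- stated objective: alternative
-- what changed: Instead of one pass that increments slots of a pre-built 16-slot list in place, B computes each of the 16 buckets independently by counting the passwords whose clamped length equals that bucket (16 per-bucket scans, no mutable histogram).
import Mathlib
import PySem

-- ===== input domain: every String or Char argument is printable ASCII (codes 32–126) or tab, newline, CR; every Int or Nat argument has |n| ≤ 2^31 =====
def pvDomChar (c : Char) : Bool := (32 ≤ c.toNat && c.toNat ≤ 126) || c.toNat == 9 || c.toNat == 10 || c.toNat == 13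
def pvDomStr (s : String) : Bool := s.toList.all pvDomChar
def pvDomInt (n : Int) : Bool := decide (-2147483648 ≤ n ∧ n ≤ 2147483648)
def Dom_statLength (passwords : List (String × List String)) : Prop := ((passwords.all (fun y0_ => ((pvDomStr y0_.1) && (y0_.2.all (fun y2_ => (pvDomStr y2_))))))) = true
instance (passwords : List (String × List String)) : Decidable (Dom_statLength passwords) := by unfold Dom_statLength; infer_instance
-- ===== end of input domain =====

-- B computes each of the 16 buckets by its own scan (count passwords whose clamped
-- length equals the bucket) instead of A's single pass incrementing a mutable histogram.

-- ===== PORT A =====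
-- one iteration of A's loop body: l = len(p); bump slot 15 if l >= 15 else slot l
def pvBumpA (counts : List Int) (p : String) : List Int :=
  let l := PySem.Str.len p
  if l ≥ 15 then counts.set 15 (counts.getD 15 0 + 1)
  else counts.set l.toNat (counts.getD l.toNat 0 + 1)

def statLength (passwords : List (String × List String)) : List (String × List Int) :=
  let allPs := ((PySem.Dict.mk passwords).get? "all").getD []
  let actPs := ((PySem.Dict.mk passwords).get? "active").getD []
  let lAll := allPs.foldl pvBumpA (List.replicate 16 0)
  let lAct := actPs.foldl pvBumpA (List.replicate 16 0)
  [("all", lAll), ("active", lAct)]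

-- ===== PORT B =====
-- B's hist: [sum(1 for p in ps if min(len(p),15)==i) for i in range(16)]
def pvHistB (ps : List String) : List Int :=
  (PySem.List.pyRange 0 16 1).map (fun i =>
    ps.foldl (fun acc p => if min (PySem.Str.len p) 15 == i then acc + 1 else acc) (0 : Int))

def statLength_alt (passwords : List (String × List String)) : List (String × List Int) :=
  [("all", pvHistB (((PySem.Dict.mk passwords).get? "all").getD [])),
   ("active", pvHistB (((PySem.Dict.mk passwords).get? "active").getD []))]

-- ===== PRECONDITION & SPEC =====
-- Pre_ excludes exactly the inputs where A raises KeyError: "all" or "active" missing.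
def Pre_statLength (passwords : List (String × List String)) : Prop :=
  (PySem.Dict.mk passwords).contains "all" = true ∧ (PySem.Dict.mk passwords).contains "active" = true
instance (passwords : List (String × List String)) : Decidable (Pre_statLength passwords) := by unfold Pre_statLength; infer_instance

def pvWitness_statLength : (List (String × List String)) := [("all", ["ab", ""]), ("active", ["xyz"])]

def Spec_statLength (passwords : List (String × List String)) (out : List (String × List Int)) : Prop := out = statLength_alt passwords
instance (passwords : List (String × List String)) (out : List (String × List Int)) : Decidable (Spec_statLength passwords out) := by unfold Spec_statLength; infer_instance

-- ===== CLAIM (what is proved, stated in full; the proofs are below) =====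
def Claim_equal_statLength : Prop := ∀ (passwords : List (String × List String)), Dom_statLength passwords → Pre_statLength passwords → Spec_statLength passwords (statLength passwords)

-- ===== LEMMAS AND PROOFS =====

-- the clamped length of a password, as an Int
def pvKey (p : String) : Int := min (PySem.Str.len p) 15

lemma pvLen_nonneg (p : String) : 0 ≤ PySem.Str.len p := by
  simp [PySem.Str.len_eq]

lemma pvRange16 : PySem.List.pyRange 0 16 1 = [0,1,2,3,4,5,6,7,8,9,10,11,12,13,14,15] := by
  decide

-- bumping slot k of a map-over-range list bumps g at k
lemma set_map_range (g : Int → Int) (k : Nat) (hk : k < 16) :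
    ((PySem.List.pyRange 0 16 1).map g).set k (((PySem.List.pyRange 0 16 1).map g).getD k 0 + 1)
      = (PySem.List.pyRange 0 16 1).map (fun i => if i = (k : Int) then g i + 1 else g i) := by
  rw [pvRange16]
  interval_cases k <;> norm_num [List.set, List.getD]

-- one A-step on a list presented as a map over range 0..15 bumps exactly slot pvKey p
lemma bumpA_map (g : Int → Int) (p : String) :
    pvBumpA ((PySem.List.pyRange 0 16 1).map g) p
      = (PySem.List.pyRange 0 16 1).map (fun i => if i = pvKey p then g i + 1 else g i) := by
  have hlen : 0 ≤ PySem.Str.len p := pvLen_nonneg p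
  by_cases h : PySem.Str.len p ≥ 15
  · have hkey : pvKey p = ((15 : Nat) : Int) := by unfold pvKey; omega
    rw [show pvBumpA ((PySem.List.pyRange 0 16 1).map g) p
          = ((PySem.List.pyRange 0 16 1).map g).set 15
              (((PySem.List.pyRange 0 16 1).map g).getD 15 0 + 1) from by
        unfold pvBumpA; rw [if_pos h]]
    rw [set_map_range g 15 (by omega), hkey]
  · have hlt : PySem.Str.len p < 15 := by omega
    have htn : (((PySem.Str.len p).toNat : Nat) : Int) = PySem.Str.len p := Int.toNat_of_nonneg hlen
    have hkey : pvKey p = (((PySem.Str.len p).toNat : Nat) : Int) := by unfold pvKey; omega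
    rw [show pvBumpA ((PySem.List.pyRange 0 16 1).map g) p
          = ((PySem.List.pyRange 0 16 1).map g).set (PySem.Str.len p).toNat
              (((PySem.List.pyRange 0 16 1).map g).getD (PySem.Str.len p).toNat 0 + 1) from by
        unfold pvBumpA; rw [if_neg h]]
    rw [set_map_range g (PySem.Str.len p).toNat (by omega), hkey]

-- A's whole loop over ps, started on any map-over-range list, adds the count of each slot
lemma foldA_map (ps : List String) : ∀ (g : Int → Int),
    ps.foldl pvBumpA ((PySem.List.pyRange 0 16 1).map g)
      = (PySem.List.pyRange 0 16 1).map (fun i => g i + ((ps.map pvKey).count i : Int)) := by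
  induction ps with
  | nil => intro g; simp
  | cons p ps ih =>
    intro g
    have h1 : (p :: ps).foldl pvBumpA ((PySem.List.pyRange 0 16 1).map g)
        = ps.foldl pvBumpA (pvBumpA ((PySem.List.pyRange 0 16 1).map g) p) := rfl
    rw [h1, bumpA_map, ih]
    apply List.map_congr_left
    intro i _
    by_cases hik : i = pvKey p
    · subst hik; simp; ring
    · have hik' : ¬ (pvKey p = i) := fun hc => hik hc.symm
      simp [hik, hik']

-- B's per-bucket counting fold equals the count of i among the clamped lengths
lemma countB_eq (ps : List String) (i : Int) : ∀ (acc : Int),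
    ps.foldl (fun acc p => if min (PySem.Str.len p) 15 == i then acc + 1 else acc) acc
      = acc + ((ps.map pvKey).count i : Int) := by
  induction ps with
  | nil => intro acc; simp
  | cons p ps ih =>
    intro acc
    simp only [List.foldl_cons, ih, List.map_cons]
    by_cases h : pvKey p = i
    · have : (min (PySem.Str.len p) 15 == i) = true := by
        unfold pvKey at h; exact beq_iff_eq.mpr h
      rw [this]
      simp [h]
      ring
    · have : (min (PySem.Str.len p) 15 == i) = false := by
        unfold pvKey at h; exact beq_eq_false_iff_ne.mpr h
      rw [this]
      have h' : ¬ (pvKey p = i) := h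
      simp [h']

-- B's hist equals the range-map of counts of clamped lengths
lemma histB_eq (ps : List String) :
    pvHistB ps = (PySem.List.pyRange 0 16 1).map (fun i => ((ps.map pvKey).count i : Int)) := by
  unfold pvHistB
  apply List.map_congr_left
  intro i _
  rw [countB_eq]
  simp

-- the two per-key histograms agree
lemma hist_agree (ps : List String) :
    ps.foldl pvBumpA (List.replicate 16 0) = pvHistB ps := by
  have hrep : (List.replicate 16 (0:Int)) = (PySem.List.pyRange 0 16 1).map (fun _ => 0) := by
    decide
  rw [hrep, foldA_map ps (fun _ => 0), histB_eq]
  simp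

-- ===== VERDICT (by name: the statement is the Claim_ definition above) =====
theorem statLength_spec : Claim_equal_statLength := by
  intro passwords _ _
  show statLength passwords = statLength_alt passwords
  unfold statLength statLength_alt
  simp only [hist_agree]
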